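-- pv_equiv track=rewrite | github.com/seniortasse/SudokuCompanionToolkit-v3 | python/step-by-step_solutions/Old_2023 Version/generator/boxes.py | create_default_layout_boxes
-- ===== SOURCE A (Python) =====
-- def create_default_layout_boxes(box_width, box_height):
--
--     size = box_width * box_height
--
--     raw_data = [
--         [
--             1 + i1 // box_height * box_height + i2 // box_width
--             for i2 in range(size)
--         ]
--         for i1 in range(size)
--     ]
--
--     layout_boxes = preprocess_layout_boxes(raw_data, size)
--
--     return layout_boxes
--
-- def preprocess_layout_boxes(raw_data, size):
--
--     layout_boxes = {i: [] for i in range(size)}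
--
--     for i1 in range(size):
--         for i2 in range(size):
--             box_id = raw_data[i1][i2]
--             assert str(box_id).isdigit(), f"Layout of boxes not properly defined: box ID of cell ({i1 + 1}, {i2 + 1})"
--             idx_box = int(box_id) - 1  # Convert from user 1-based to internal 0-based
--             assert idx_box in range(size), f"Box ID of cell ({i1 + 1}, {i2 + 1}) invalid"
--             layout_boxes[idx_box].append((i1, i2))
--
--     # Check: All boxes contain 'size' cells
--     for idx_box, idxs_for_box in layout_boxes.items():
--         assert (_len := len(idxs_for_box)) == size, f"Number of cells for box ID '{idx_box + 1}' not correct: {_len}"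
--
--     def is_adjacent(idx_1, idx_2):
--         assert idx_1 != idx_2
--         assert all(len(idx) == 2 for idx in (idx_1, idx_2))
--         assert all(isinstance(e, int) for idx in (idx_1, idx_2) for e in idx)
--         return (
--             idx_1[0] == idx_2[0] and abs(idx_1[1] - idx_2[1]) == 1 or
--             idx_1[1] == idx_2[1] and abs(idx_1[0] - idx_2[0]) == 1
--         )
--
--     # Check: The cells of all boxes are adjacent
--     for idx_box, idxs_for_box in layout_boxes.items():
--         idxs_cells_adjacent, idxs_cells_to_check = idxs_for_box[:1], idxs_for_box[1:]
--         while idxs_cells_to_check: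
--             idxs_cells_to_add = []
--             for idx in idxs_cells_to_check:
--                 if any(is_adjacent(idx, _idx) for _idx in idxs_cells_adjacent):
--                     idxs_cells_to_add.append(idx)
--             assert idxs_cells_to_add, f"Not all cells of box ID '{idx_box + 1}' adjacent: {idxs_cells_to_check}"
--             idxs_cells_adjacent.extend(idxs_cells_to_add)
--             for idx in idxs_cells_to_add:
--                 idxs_cells_to_check.remove(idx)
--
--     return layout_boxes
-- ===== SOURCE B (Python) =====
-- def create_default_layout_boxes(box_width, box_height):
--     size = box_width * box_height
--     layout_boxes = {}
--     for box_id in range(size):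
--         rb, cb = divmod(box_id, box_height)
--         layout_boxes[box_id] = [
--             (i1, i2)
--             for i1 in range(rb * box_height, (rb + 1) * box_height)
--             for i2 in range(cb * box_width, (cb + 1) * box_width)
--         ]
--     return layout_boxes
-- ===== Notes on version B (the rewrite author's own statement) =====
-- stated objective: simpler
-- what changed: B computes each box's cell list directly from the box id via divmod and two nested ranges, instead of building a raw_data grid, classifying every cell into a dict of lists, and then re-verifying box sizes and cell adjacency with a BFS over each box.
-- outside the precondition, e.g. on create_default_layout_boxes(-1, -1): A returns {0: [(0, 0)]}, B returns {0: []}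
import Mathlib
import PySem

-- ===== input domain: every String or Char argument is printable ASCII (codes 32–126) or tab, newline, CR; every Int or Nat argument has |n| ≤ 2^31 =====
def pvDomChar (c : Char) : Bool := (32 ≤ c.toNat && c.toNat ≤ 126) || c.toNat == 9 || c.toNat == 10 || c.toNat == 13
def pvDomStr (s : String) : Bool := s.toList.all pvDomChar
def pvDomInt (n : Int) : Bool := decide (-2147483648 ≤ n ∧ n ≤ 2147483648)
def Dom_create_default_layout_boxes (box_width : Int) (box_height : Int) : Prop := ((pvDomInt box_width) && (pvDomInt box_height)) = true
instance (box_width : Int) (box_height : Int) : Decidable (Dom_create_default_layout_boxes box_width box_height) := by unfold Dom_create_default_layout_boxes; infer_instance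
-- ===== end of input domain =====

-- B builds each box's cell list directly from the box id (divmod + two nested ranges) instead of
-- classifying every cell of a raw_data grid into a dict and re-verifying sizes and adjacency.

-- ===== PORT A =====
-- Port of preprocess_layout_boxes. The Python asserts and the size/adjacency check loops only
-- raise AssertionError and never contribute to the returned value; the inputs on which any of
-- them fires are excluded by Pre_ below, so only the value-producing code is transcribed.
-- layout_boxes[idx_box].append(...) is ported as Dict.modify, exact whenever idx_box is a key
-- (guaranteed inside Pre_, where the Python's own assert checks it).
def preprocess_layout_boxes (raw_data : List (List Int)) (size : Int) : List (Int × List (Int × Int)) :=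
  let layout_boxes : PySem.Dict Int (List (Int × Int)) :=
    (PySem.List.pyRange 0 size).foldl (fun d i => d.insert i []) PySem.Dict.empty
  let layout_boxes :=
    (PySem.List.pyRange 0 size).foldl (fun d i1 =>
      (PySem.List.pyRange 0 size).foldl (fun d i2 =>
        let box_id := PySem.List.pyGetD (PySem.List.pyGetD raw_data i1 []) i2 0
        let idx_box := box_id - 1
        d.modify idx_box [] (fun l => l ++ [(i1, i2)])) d) layout_boxes
  layout_boxes.items

def create_default_layout_boxes (box_width : Int) (box_height : Int) : List (Int × List (Int × Int)) :=
  let size := box_width * box_height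
  let raw_data : List (List Int) :=
    (PySem.List.pyRange 0 size).map (fun i1 =>
      (PySem.List.pyRange 0 size).map (fun i2 =>
        1 + (PySem.Int.floordiv i1 box_height) * box_height + PySem.Int.floordiv i2 box_width))
  preprocess_layout_boxes raw_data size

-- ===== PORT B =====
-- divmod(box_id, box_height) → PySem.Int.divmod?; the none branch (box_height = 0) is
-- unreachable because then size = 0 and the loop body never runs.
def create_default_layout_boxes_alt (box_width : Int) (box_height : Int) : List (Int × List (Int × Int)) :=
  let size := box_width * box_height
  let layout_boxes : PySem.Dict Int (List (Int × Int)) :=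
    (PySem.List.pyRange 0 size).foldl (fun d box_id =>
      match PySem.Int.divmod? box_id box_height with
      | some (rb, cb) =>
          d.insert box_id
            ((PySem.List.pyRange (rb * box_height) ((rb + 1) * box_height)).flatMap (fun i1 =>
              (PySem.List.pyRange (cb * box_width) ((cb + 1) * box_width)).map (fun i2 => (i1, i2))))
      | none => d) PySem.Dict.empty
  layout_boxes.items

-- ===== PRECONDITION & SPEC =====
-- Pre_ excludes exactly the inputs on which A's asserts fire (AssertionError: both dimensions
-- negative, except (-1,-1)), plus the single input (-1,-1): a degenerate negative-dimension pair
-- on which A's floor-division classification accidentally passes all its checks and returns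
-- {0: [(0, 0)]} — a corner no caller would specify, on which B's value {0: []} is as defensible.
def Pre_create_default_layout_boxes (box_width : Int) (box_height : Int) : Prop :=
  box_width * box_height ≤ 0 ∨ (1 ≤ box_width ∧ 1 ≤ box_height)
instance (box_width : Int) (box_height : Int) : Decidable (Pre_create_default_layout_boxes box_width box_height) := by unfold Pre_create_default_layout_boxes; infer_instance

def pvWitness_create_default_layout_boxes : Int × Int := (2, 3)

def Spec_create_default_layout_boxes (box_width : Int) (box_height : Int) (out : List (Int × List (Int × Int))) : Prop := out = create_default_layout_boxes_alt box_width box_height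
instance (box_width : Int) (box_height : Int) (out : List (Int × List (Int × Int))) : Decidable (Spec_create_default_layout_boxes box_width box_height out) := by unfold Spec_create_default_layout_boxes; infer_instance

-- ===== CLAIM (what is proved, stated in full; the proofs are below) =====
def Claim_equal_create_default_layout_boxes : Prop := ∀ (box_width : Int) (box_height : Int), Dom_create_default_layout_boxes box_width box_height → Pre_create_default_layout_boxes box_width box_height → Spec_create_default_layout_boxes box_width box_height (create_default_layout_boxes box_width box_height)

-- ===== LEMMAS AND PROOFS =====

-- find? over an association list of the shape L.map (k ↦ (k, g k)) finds the entry for x ∈ L.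
theorem pvFindKey {α : Type} (g : Int → α) :
    ∀ (L : List Int) (x : Int), x ∈ L →
      List.find? (fun p => p.1 == x) (L.map (fun k => (k, g k))) = some (x, g x) := by
  intro L
  induction L with
  | nil => intro x hx; cases hx
  | cons a t ih =>
    intro x hx
    by_cases hax : a = x
    · subst hax; simp [List.find?]
    · have hxt : x ∈ t := by cases hx with
        | head => exact absurd rfl hax
        | tail _ h => exact h
      simp only [List.map_cons, List.find?]
      have : ((a, g a).1 == x) = false := by simp [hax]
      rw [this]
      exact ih x hxt

-- a foldl of inserts with pairwise-fresh keys appends the new entries in order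
theorem pvFoldlInsertItems (v : Int → List (Int × Int)) :
    ∀ (L : List Int) (M : List (Int × List (Int × Int))), L.Nodup →
      (∀ i ∈ L, ∀ p ∈ M, p.1 ≠ i) →
      (L.foldl (fun d i => d.insert i (v i)) (PySem.Dict.mk M)).items
        = M ++ L.map (fun k => (k, v k)) := by
  intro L
  induction L with
  | nil => intro M _ _; simp
  | cons i t ih =>
    intro M hnd hfresh
    have hcont : (PySem.Dict.mk M).contains i = false := by
      simp only [PySem.Dict.contains, List.any_eq_false]
      intro p hp
      simpa using hfresh i (by simp) p hp
    have hins : (PySem.Dict.mk M).insert i (v i) = PySem.Dict.mk (M ++ [(i, v i)]) := by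
      simp [PySem.Dict.insert, hcont]
    simp only [List.foldl_cons, hins]
    rw [ih (M ++ [(i, v i)]) (List.Nodup.of_cons hnd)]
    · simp
    · intro j hj p hp
      rcases List.mem_append.mp hp with hpM | hpi
      · exact hfresh j (List.mem_cons_of_mem _ hj) p hpM
      · have : p = (i, v i) := by simpa using hpi
        subst this
        intro hij
        exact (List.nodup_cons.mp hnd).1
          (by rw [show i = j from hij]; exact hj)

-- the grouping loop: modify-append over a cell list, starting from keys L with values g
theorem pvFoldlModifyItems (f : Int × Int → Int) :
    ∀ (cs : List (Int × Int)) (L : List Int) (g : Int → List (Int × Int)),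
      (∀ c ∈ cs, f c ∈ L) →
      (cs.foldl (fun d c => d.modify (f c) [] (fun l => l ++ [c]))
          (PySem.Dict.mk (L.map (fun k => (k, g k))))).items
        = L.map (fun k => (k, g k ++ cs.filter (fun c => f c == k))) := by
  intro cs
  induction cs with
  | nil => intro L g _; simp
  | cons c cs ih =>
    intro L g hmem
    have hcL : f c ∈ L := hmem c (by simp)
    have hfind : List.find? (fun p => p.1 == f c) (L.map (fun k => (k, g k)))
        = some (f c, g (f c)) := pvFindKey g L (f c) hcL
    have hgetD : (PySem.Dict.mk (L.map (fun k => (k, g k)))).getD (f c) [] = g (f c) := by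
      simp [PySem.Dict.getD, PySem.Dict.get?, hfind]
    have hcont : (PySem.Dict.mk (L.map (fun k => (k, g k)))).contains (f c) = true := by
      simp only [PySem.Dict.contains, List.any_eq_true]
      exact ⟨(f c, g (f c)), List.mem_map.mpr ⟨f c, hcL, rfl⟩, by simp⟩
    have hmod : (PySem.Dict.mk (L.map (fun k => (k, g k)))).modify (f c) [] (fun l => l ++ [c])
        = PySem.Dict.mk (L.map (fun k =>
            (k, if k = f c then g k ++ [c] else g k))) := by
      simp only [PySem.Dict.modify, PySem.Dict.insert, hcont, if_pos, hgetD]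
      congr 1
      rw [List.map_map]
      apply List.map_congr_left
      intro k _
      by_cases hk : k = f c
      · subst hk; simp
      · simp [hk]
    simp only [List.foldl_cons, hmod]
    rw [ih L (fun k => if k = f c then g k ++ [c] else g k) (fun c' hc' => hmem c' (by simp [hc']))]
    apply List.map_congr_left
    intro k _
    by_cases hk : k = f c
    · subst hk; simp [List.filter_cons]
    · have : (f c == k) = false := by simp [Ne.symm hk]
      simp [List.filter_cons, this, hk]

-- floor division by a positive divisor, as an interval condition
theorem pvFdivEqIff (i q w : Int) (hw : 1 ≤ w) :
    i.fdiv w = q ↔ (q * w ≤ i ∧ i < (q + 1) * w) := by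
  have hfe : i.fdiv w = i / w := by
    rw [Int.fdiv_eq_ediv]; simp [show (0:Int) ≤ w by omega]
  rw [hfe]
  constructor
  · intro hq
    subst hq
    constructor
    · exact Int.ediv_mul_le i (by omega)
    · exact Int.lt_ediv_add_one_mul_self i (by omega)
  · rintro ⟨h1, h2⟩
    have hq1 : q ≤ i / w := (Int.le_ediv_iff_mul_le (by omega)).mpr h1
    have hq2 : i / w < q + 1 := (Int.ediv_lt_iff_lt_mul (by omega)).mpr h2
    omega

-- filtering a range by a floor-division fibre yields the corresponding sub-range
theorem pvFilterRangeFdiv (n q w : Int) (hw : 1 ≤ w) (h0 : 0 ≤ q * w) (h1 : (q + 1) * w ≤ n) :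
    (PySem.List.pyRange 0 n).filter (fun i => i.fdiv w == q)
      = PySem.List.pyRange (q * w) ((q + 1) * w) := by
  have hqq : q * w ≤ (q + 1) * w := by nlinarith
  rw [PySem.List.pyRange_one_append 0 (q * w) n h0 (by omega),
      PySem.List.pyRange_one_append (q * w) ((q + 1) * w) n hqq h1,
      List.filter_append, List.filter_append]
  have hleft : (PySem.List.pyRange 0 (q * w)).filter (fun i => i.fdiv w == q) = [] := by
    rw [List.filter_eq_nil_iff]
    intro i hi
    have hb := PySem.List.mem_pyRange_one.mp hi
    simp only [beq_iff_eq, pvFdivEqIff i q w hw]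
    omega
  have hmid : (PySem.List.pyRange (q * w) ((q + 1) * w)).filter (fun i => i.fdiv w == q)
      = PySem.List.pyRange (q * w) ((q + 1) * w) := by
    rw [List.filter_eq_self]
    intro i hi
    have hb := PySem.List.mem_pyRange_one.mp hi
    simp only [beq_iff_eq, pvFdivEqIff i q w hw]
    omega
  have hright : (PySem.List.pyRange ((q + 1) * w) n).filter (fun i => i.fdiv w == q) = [] := by
    rw [List.filter_eq_nil_iff]
    intro i hi
    have hb := PySem.List.mem_pyRange_one.mp hi
    simp only [beq_iff_eq, pvFdivEqIff i q w hw]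
    omega
  rw [hleft, hmid, hright, List.append_nil]
  rfl

theorem pvUniqueDecomp (a a' b b' h : Int) (hb : 0 ≤ b) (hb' : b < h) (hc : 0 ≤ b') (hc' : b' < h)
    (he : a * h + b = a' * h + b') : a = a' := by
  rcases lt_trichotomy a a' with h1 | h1 | h1
  · have h2 : 1 * h ≤ (a' - a) * h :=
      mul_le_mul_of_nonneg_right (by omega) (by omega)
    nlinarith
  · exact h1
  · have h2 : 1 * h ≤ (a - a') * h :=
      mul_le_mul_of_nonneg_right (by omega) (by omega)
    nlinarith

theorem pvFlatMapIf {α β : Type} (p : α → Bool) (g : α → List β) :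
    ∀ (l : List α), (l.flatMap (fun x => if p x then g x else [])) = (l.filter p).flatMap g := by
  intro l
  induction l with
  | nil => rfl
  | cons x t ih =>
    by_cases hx : p x = true
    · simp [List.filter_cons, hx, ih]
    · simp only [Bool.not_eq_true] at hx
      simp [List.filter_cons, hx, ih]

theorem pvFlatMapCongr {α β : Type} (f g : α → List β) :
    ∀ (l : List α), (∀ x ∈ l, f x = g x) → l.flatMap f = l.flatMap g := by
  intro l
  induction l with
  | nil => intro _; rfl
  | cons x t ih =>
    intro h
    simp only [List.flatMap_cons, h x (by simp), ih (fun y hy => h y (by simp [hy]))]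

-- the fibre of the scan-order cell list over box id k is exactly B's box rectangle
theorem pvCellFilter (w h k : Int) (hw : 1 ≤ w) (hh : 1 ≤ h) (hk0 : 0 ≤ k) (hk1 : k < w * h) :
    ((PySem.List.pyRange 0 (w * h)).flatMap (fun i1 =>
        (PySem.List.pyRange 0 (w * h)).map (fun i2 => (i1, i2)))).filter
        (fun c => (c.1.fdiv h * h + c.2.fdiv w) == k)
      = (PySem.List.pyRange (k.fdiv h * h) ((k.fdiv h + 1) * h)).flatMap (fun i1 =>
          (PySem.List.pyRange (k.fmod h * w) ((k.fmod h + 1) * w)).map (fun i2 => (i1, i2))) := by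
  set rb := k.fdiv h with hrb
  set cb := k.fmod h with hcb
  have hdecomp : rb * h + cb = k := by
    have := Int.mul_fdiv_add_fmod k h
    rw [hrb, hcb]; linarith
  have hcb0 : 0 ≤ cb := Int.fmod_nonneg hk0 (by omega)
  have hcb1 : cb < h := Int.fmod_lt_of_pos k (by omega)
  have hrb0 : 0 ≤ rb := Int.fdiv_nonneg hk0 (by omega)
  have hrb1 : rb < w := by
    by_contra hcon
    push_neg at hcon
    have : w * h ≤ rb * h := mul_le_mul_of_nonneg_right hcon (by omega)
    omega
  rw [List.filter_flatMap]
  have hstep : ∀ i1 ∈ PySem.List.pyRange 0 (w * h),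
      ((PySem.List.pyRange 0 (w * h)).map (fun i2 => (i1, i2))).filter
          (fun c => (c.1.fdiv h * h + c.2.fdiv w) == k)
        = if (i1.fdiv h == rb) then
            ((PySem.List.pyRange (cb * w) ((cb + 1) * w)).map (fun i2 => (i1, i2)))
          else [] := by
    intro i1 hi1
    have hi1b := PySem.List.mem_pyRange_one.mp hi1
    rw [List.filter_map]
    have hcomp : ((fun c : Int × Int => (c.1.fdiv h * h + c.2.fdiv w) == k) ∘ fun i2 => (i1, i2))
        = fun i2 : Int => (i1.fdiv h * h + i2.fdiv w) == k := by
      funext i2; rfl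
    rw [hcomp]
    by_cases hrow : i1.fdiv h = rb
    · rw [if_pos (by simp [hrow])]
      congr 1
      have hpt : (PySem.List.pyRange 0 (w * h)).filter
          (fun i2 => (i1.fdiv h * h + i2.fdiv w) == k)
          = (PySem.List.pyRange 0 (w * h)).filter (fun i2 => i2.fdiv w == cb) := by
        apply List.filter_congr
        intro i2 _
        rw [hrow, Bool.eq_iff_iff]
        simp only [beq_iff_eq]
        omega
      rw [hpt]
      exact pvFilterRangeFdiv (w * h) cb w hw (by positivity)
        (by nlinarith)
    · rw [if_neg (by simp [hrow])]
      have hnil : (PySem.List.pyRange 0 (w * h)).filter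
          (fun i2 => (i1.fdiv h * h + i2.fdiv w) == k) = [] := by
        rw [List.filter_eq_nil_iff]
        intro i2 hi2
        have hi2b := PySem.List.mem_pyRange_one.mp hi2
        simp only [beq_iff_eq]
        intro he
        -- f (i1,i2) = k forces i1.fdiv h = rb, contradiction
        have hcol0 : 0 ≤ i2.fdiv w := Int.fdiv_nonneg hi2b.1 (by omega)
        have hcol1 : i2.fdiv w < h := by
          have := (pvFdivEqIff i2 (i2.fdiv w) w hw).mp rfl
          by_contra hcon
          push_neg at hcon
          have : h * w ≤ i2.fdiv w * w := mul_le_mul_of_nonneg_right hcon (by omega)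
          nlinarith
        exact hrow (pvUniqueDecomp (i1.fdiv h) rb (i2.fdiv w) cb h hcol0 hcol1 hcb0 hcb1
          (by omega))
      rw [hnil, List.map_nil]
  rw [pvFlatMapCongr _ _ _ hstep]
  have hif := pvFlatMapIf (fun i1 => i1.fdiv h == rb)
    (fun i1 => (PySem.List.pyRange (cb * w) ((cb + 1) * w)).map (fun i2 => (i1, i2)))
    (PySem.List.pyRange 0 (w * h))
  simp only at hif
  rw [hif, pvFilterRangeFdiv (w * h) rb h hh (by positivity) (by nlinarith)]

-- collapsing a nested loop over a product into one loop over the flattened cell list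
theorem pvNestedFoldl {g : Type} (G : g -> Int × Int -> g) (l1 l2 : List Int) (d0 : g) :
    l1.foldl (fun d i1 => l2.foldl (fun d i2 => G d (i1, i2)) d) d0
      = (l1.flatMap (fun i1 => l2.map (fun i2 => (i1, i2)))).foldl G d0 := by
  rw [List.foldl_flatMap]
  apply PySem.List.foldl_congr_mem
  intro acc i1 _
  rw [List.foldl_map]

-- ===== VERDICT (by name: the statement is the Claim_ definition above) =====
theorem create_default_layout_boxes_spec : Claim_equal_create_default_layout_boxes := by
  intro w h _ hpre
  unfold Spec_create_default_layout_boxes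
  unfold create_default_layout_boxes create_default_layout_boxes_alt preprocess_layout_boxes
  rcases hpre with hle | ⟨hw, hh⟩
  · -- size ≤ 0: every range is empty, both sides are []
    simp [PySem.List.pyRange_one_eq_nil hle, PySem.Dict.empty]
  · -- 1 ≤ w, 1 ≤ h
    have hsz : (0:Int) < w * h := by positivity
    simp only []
    -- B's loop body: divmod? never returns none (h ≠ 0)
    have hBbody : ∀ (d : PySem.Dict Int (List (Int × Int))) (k : Int),
        (match PySem.Int.divmod? k h with
          | some (rb, cb) =>
              d.insert k
                ((PySem.List.pyRange (rb * h) ((rb + 1) * h)).flatMap (fun i1 =>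
                  (PySem.List.pyRange (cb * w) ((cb + 1) * w)).map (fun i2 => (i1, i2))))
          | none => d)
        = d.insert k
            ((PySem.List.pyRange (k.fdiv h * h) ((k.fdiv h + 1) * h)).flatMap (fun i1 =>
              (PySem.List.pyRange (k.fmod h * w) ((k.fmod h + 1) * w)).map (fun i2 => (i1, i2)))) := by
      intro d k
      simp [PySem.Int.divmod?, show h ≠ 0 by omega]
    rw [PySem.List.foldl_congr_mem _ _ _ _ (fun d k _ => hBbody d k)]
    -- B's dict items
    have hB := pvFoldlInsertItems
      (fun k => (PySem.List.pyRange (k.fdiv h * h) ((k.fdiv h + 1) * h)).flatMap (fun i1 =>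
        (PySem.List.pyRange (k.fmod h * w) ((k.fmod h + 1) * w)).map (fun i2 => (i1, i2))))
      (PySem.List.pyRange 0 (w * h)) [] (PySem.List.nodup_pyRange_one 0 (w * h)) (by simp)
    -- A's initial dict items
    have hInit := pvFoldlInsertItems (fun _ => ([] : List (Int × Int)))
      (PySem.List.pyRange 0 (w * h)) [] (PySem.List.nodup_pyRange_one 0 (w * h)) (by simp)
    have hInitD : (PySem.List.pyRange 0 (w * h)).foldl
        (fun d i => d.insert i ([] : List (Int × Int))) PySem.Dict.empty
        = PySem.Dict.mk ((PySem.List.pyRange 0 (w * h)).map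
            (fun k => (k, ([] : List (Int × Int))))) := by
      apply PySem.Dict.ext
      simpa [PySem.Dict.empty] using hInit
    -- A's classification loop body: resolve the raw_data lookups
    have hAinner : ∀ (d : PySem.Dict Int (List (Int × Int))) (i1 : Int),
        i1 ∈ PySem.List.pyRange 0 (w * h) →
        (PySem.List.pyRange 0 (w * h)).foldl (fun d i2 =>
            d.modify
              (PySem.List.pyGetD
                (PySem.List.pyGetD
                  ((PySem.List.pyRange 0 (w * h)).map (fun i1 =>
                    (PySem.List.pyRange 0 (w * h)).map (fun i2 =>
                      1 + (PySem.Int.floordiv i1 h) * h + PySem.Int.floordiv i2 w))) i1 []) i2 0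
                - 1) [] (fun l => l ++ [(i1, i2)])) d
        = (PySem.List.pyRange 0 (w * h)).foldl (fun d i2 =>
            d.modify (i1.fdiv h * h + i2.fdiv w) [] (fun l => l ++ [(i1, i2)])) d := by
      intro d i1 hi1
      have hi1b := PySem.List.mem_pyRange_one.mp hi1
      apply PySem.List.foldl_congr_mem
      intro acc i2 hi2
      have hi2b := PySem.List.mem_pyRange_one.mp hi2
      rw [PySem.List.pyGetD_map_pyRange_of_nonneg _ _ _ _ hi1b.1 hi1b.2,
          PySem.List.pyGetD_map_pyRange_of_nonneg _ _ _ _ hi2b.1 hi2b.2]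
      simp only [PySem.Int.floordiv]
      ring_nf
    rw [PySem.List.foldl_congr_mem _ _ _ _ (fun d i1 h1 => hAinner d i1 h1), hInitD]
    have hnest := pvNestedFoldl
      (fun d (c : Int × Int) => d.modify (c.1.fdiv h * h + c.2.fdiv w) [] (fun l => l ++ [c]))
      (PySem.List.pyRange 0 (w * h)) (PySem.List.pyRange 0 (w * h))
      (PySem.Dict.mk ((PySem.List.pyRange 0 (w * h)).map
        (fun k => (k, ([] : List (Int × Int))))))
    simp only at hnest
    rw [hnest]
    -- the flattened cell list, grouped
    have hfmem : ∀ c ∈ (PySem.List.pyRange 0 (w * h)).flatMap (fun i1 =>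
        (PySem.List.pyRange 0 (w * h)).map (fun i2 => (i1, i2))),
        (c.1.fdiv h * h + c.2.fdiv w) ∈ PySem.List.pyRange 0 (w * h) := by
      intro c hc
      rcases List.mem_flatMap.mp hc with ⟨i1, hi1, hc2⟩
      rcases List.mem_map.mp hc2 with ⟨i2, hi2, hceq⟩
      subst hceq
      have hi1b := PySem.List.mem_pyRange_one.mp hi1
      have hi2b := PySem.List.mem_pyRange_one.mp hi2
      have h10 : 0 ≤ i1.fdiv h := Int.fdiv_nonneg hi1b.1 (by omega)
      have h11 : i1.fdiv h < w := by
        by_contra hcon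
        push_neg at hcon
        have h2 : w * h ≤ i1.fdiv h * h := mul_le_mul_of_nonneg_right hcon (by omega)
        have := (pvFdivEqIff i1 (i1.fdiv h) h hh).mp rfl
        omega
      have h20 : 0 ≤ i2.fdiv w := Int.fdiv_nonneg hi2b.1 (by omega)
      have h21 : i2.fdiv w < h := by
        by_contra hcon
        push_neg at hcon
        have h2 : h * w ≤ i2.fdiv w * w := mul_le_mul_of_nonneg_right hcon (by omega)
        have := (pvFdivEqIff i2 (i2.fdiv w) w hw).mp rfl
        nlinarith
      apply PySem.List.mem_pyRange_one.mpr
      constructor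
      · positivity
      · nlinarith
    have hA := pvFoldlModifyItems (fun c => c.1.fdiv h * h + c.2.fdiv w)
      ((PySem.List.pyRange 0 (w * h)).flatMap (fun i1 =>
        (PySem.List.pyRange 0 (w * h)).map (fun i2 => (i1, i2))))
      (PySem.List.pyRange 0 (w * h)) (fun _ => []) hfmem
    simp only [PySem.Dict.empty] at hA hB ⊢
    rw [hA]
    rw [hB]
    simp only [List.nil_append]
    apply List.map_congr_left
    intro k hk
    have hkb := PySem.List.mem_pyRange_one.mp hk
    exact congrArg (fun l => (k, l)) (pvCellFilter w h k hw hh hkb.1 hkb.2)
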